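-- pv_equiv track=rewrite | github.com/mattischneider/aoc2020 | 20a.py | get_number_of_impossible_side_matches
-- ===== SOURCE A (Python) =====
-- def get_all_possible_sides(tile_def):
--     left_side = ''.join([tile_def[i][0] for i in range(len(tile_def))])
--     rigth_side = ''.join([tile_def[i][-1] for i in range(len(tile_def))])
--     top_side = tile_def[0]
--     bottom_side = tile_def[-1]
--     output = [left_side, rigth_side, top_side, bottom_side,
--               left_side[::-1], rigth_side[::-1], top_side[::-1], bottom_side[::-1]]
--     return output
--
-- def get_number_of_impossible_side_matches(tile_name, tiles):
--     possible_sides = get_all_possible_sides(tiles[tile_name])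
--     all_other_sides = []
--     for t in tiles.keys():
--         if t != tile_name:
--             all_other_sides += get_all_possible_sides(tiles[t])
--     out = sum(1 for s in possible_sides if s not in all_other_sides)
--     return(out)
-- ===== SOURCE B (Python) =====
-- def _matches(s, g):
--     base = (''.join(row[0] for row in g), ''.join(row[-1] for row in g),
--             g[0], g[-1])
--     return s in base or s[::-1] in base
--
-- def get_number_of_impossible_side_matches(tile_name, tiles):
--     grid = tiles[tile_name]
--     base = [''.join(row[0] for row in grid),
--             ''.join(row[-1] for row in grid),
--             grid[0], grid[-1]]
--     sides = base + [s[::-1] for s in base]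
--     count = 0
--     for s in sides:
--         if not any(t != tile_name and _matches(s, g)
--                    for t, g in tiles.items()):
--             count += 1
--     return count
-- ===== Notes on version B (the rewrite author's own statement) =====
-- stated objective: alternative
-- what changed: B drops A's up-front accumulation of all other tiles' 8-side lists and instead, for each of the target's 8 sides, short-circuit scans the dict items testing the side (forward or reversed) against each other tile's 4 base sides.
import Mathlib
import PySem

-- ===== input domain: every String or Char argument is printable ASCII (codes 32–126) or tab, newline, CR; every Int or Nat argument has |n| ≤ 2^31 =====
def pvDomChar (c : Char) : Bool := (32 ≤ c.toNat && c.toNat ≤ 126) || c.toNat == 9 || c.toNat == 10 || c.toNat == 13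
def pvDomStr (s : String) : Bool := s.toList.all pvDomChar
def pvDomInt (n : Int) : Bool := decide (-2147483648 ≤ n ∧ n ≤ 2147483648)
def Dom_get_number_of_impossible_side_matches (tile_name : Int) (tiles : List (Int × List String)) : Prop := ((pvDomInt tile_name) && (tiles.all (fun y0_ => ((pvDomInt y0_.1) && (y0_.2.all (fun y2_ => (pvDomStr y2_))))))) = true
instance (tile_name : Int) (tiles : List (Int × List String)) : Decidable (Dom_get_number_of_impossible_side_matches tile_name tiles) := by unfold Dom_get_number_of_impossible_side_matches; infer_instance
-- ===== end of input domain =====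

-- ===== PORT A =====
-- B re-tests each of the target's 8 sides directly against each other tile's 4 base sides (forward or reversed),
-- instead of A's building the full list of all other tiles' 8 sides up front; alternative decomposition, same cost.
-- Strings are handled as their character lists (''.join of 1-char strings = the char list; String equality ↔ list equality) — exact.
def pvSidesA (tile_def : List String) : List (List Char) :=
  let rows := tile_def.map String.toList
  let left_side := (PySem.List.pyRange 0 (PySem.List.len rows)).map (fun i => PySem.List.pyGetD (PySem.List.pyGetD rows i []) 0 ' ')
  let rigth_side := (PySem.List.pyRange 0 (PySem.List.len rows)).map (fun i => PySem.List.pyGetD (PySem.List.pyGetD rows i []) (-1) ' ')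
  let top_side := PySem.List.pyGetD rows 0 []
  let bottom_side := PySem.List.pyGetD rows (-1) []
  [left_side, rigth_side, top_side, bottom_side,
   left_side.reverse, rigth_side.reverse, top_side.reverse, bottom_side.reverse]

def get_number_of_impossible_side_matches (tile_name : Int) (tiles : List (Int × List String)) : Int :=
  let d := PySem.Dict.ofList tiles
  let possible_sides := pvSidesA (d.getD tile_name [])
  let all_other_sides := d.keys.foldl
    (fun acc t => if t ≠ tile_name then acc ++ pvSidesA (d.getD t []) else acc) []
  ((possible_sides.filter (fun s => !(all_other_sides.contains s))).length : Int)

-- ===== PORT B =====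
def pvBaseSides (grid : List (List Char)) : List (List Char) :=
  [grid.map (fun row => PySem.List.pyGetD row 0 ' '),
   grid.map (fun row => PySem.List.pyGetD row (-1) ' '),
   PySem.List.pyGetD grid 0 [],
   PySem.List.pyGetD grid (-1) []]

def pvMatches (s : List Char) (g : List (List Char)) : Bool :=
  let base := pvBaseSides g
  base.contains s || base.contains s.reverse

def get_number_of_impossible_side_matches_alt (tile_name : Int) (tiles : List (Int × List String)) : Int :=
  let d := PySem.Dict.ofList tiles
  let grid := (d.getD tile_name []).map String.toList
  let base := pvBaseSides grid
  let sides := base ++ base.map List.reverse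
  sides.foldl
    (fun n s =>
      if d.items.any (fun p => (p.1 != tile_name) && pvMatches s (p.2.map String.toList)) then n
      else n + 1) 0

-- ===== PRECONDITION & SPEC =====
-- Pre_ excludes exactly the inputs where the Python A raises: a KeyError when tile_name is not a key of tiles,
-- and an IndexError when some tile grid is the empty list or contains an empty row.
def Pre_get_number_of_impossible_side_matches (tile_name : Int) (tiles : List (Int × List String)) : Prop :=
  tile_name ∈ tiles.map Prod.fst ∧ ∀ p ∈ tiles, p.2 ≠ [] ∧ ∀ r ∈ p.2, r ≠ ""
instance (tile_name : Int) (tiles : List (Int × List String)) : Decidable (Pre_get_number_of_impossible_side_matches tile_name tiles) := by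
  unfold Pre_get_number_of_impossible_side_matches; infer_instance
def pvWitness_get_number_of_impossible_side_matches : Int × (List (Int × List String)) :=
  (1, [(1, ["ab", "cd"]), (2, ["xy", "zw"])])
def Spec_get_number_of_impossible_side_matches (tile_name : Int) (tiles : List (Int × List String)) (out : Int) : Prop := out = get_number_of_impossible_side_matches_alt tile_name tiles
instance (tile_name : Int) (tiles : List (Int × List String)) (out : Int) : Decidable (Spec_get_number_of_impossible_side_matches tile_name tiles out) := by unfold Spec_get_number_of_impossible_side_matches; infer_instance

-- ===== CLAIM (what is proved, stated in full; the proofs are below) =====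
def Claim_equal_get_number_of_impossible_side_matches : Prop := ∀ (tile_name : Int) (tiles : List (Int × List String)), Dom_get_number_of_impossible_side_matches tile_name tiles → Pre_get_number_of_impossible_side_matches tile_name tiles → Spec_get_number_of_impossible_side_matches tile_name tiles (get_number_of_impossible_side_matches tile_name tiles)

-- ===== LEMMAS AND PROOFS =====

-- a column read through range(len) indices equals the row-wise map
theorem pvColMap (rows : List (List Char)) (j : Int) (c : Char) :
    (PySem.List.pyRange 0 (PySem.List.len rows)).map
        (fun i => PySem.List.pyGetD (PySem.List.pyGetD rows i []) j c)
      = rows.map (fun r => PySem.List.pyGetD r j c) := by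
  conv_rhs => rw [← PySem.List.map_pyGetD_pyRange_zero rows ([] : List Char)]
  simp [List.map_map, Function.comp]

-- A's 8-side list is B's base sides followed by their reversals.
theorem pvSidesA_eq (td : List String) :
    pvSidesA td = pvBaseSides (td.map String.toList) ++ (pvBaseSides (td.map String.toList)).map List.reverse := by
  simp only [pvSidesA, pvBaseSides]
  rw [pvColMap, pvColMap]
  simp

-- membership in a tile's 8 sides ↔ B's per-tile test
theorem mem_sidesA_iff (s : List Char) (td : List String) :
    s ∈ pvSidesA td ↔ pvMatches s (td.map String.toList) = true := by
  rw [pvSidesA_eq]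
  simp only [pvMatches, Bool.or_eq_true, List.contains_iff_mem, List.mem_append, List.mem_map]
  constructor
  · rintro (h | ⟨a, ha, rfl⟩)
    · exact Or.inl h
    · exact Or.inr (by simpa using ha)
  · rintro (h | h)
    · exact Or.inl h
    · exact Or.inr ⟨s.reverse, h, by simp⟩

-- membership in A's accumulated list of all other tiles' sides ↔ B's any over the dict items
theorem pvAllOther_iff (tile_name : Int) (tiles : List (Int × List String)) (s : List Char) :
    ((PySem.Dict.ofList tiles).keys.foldl
        (fun acc t => if t ≠ tile_name then acc ++ pvSidesA ((PySem.Dict.ofList tiles).getD t []) else acc) []).contains s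
      = ((PySem.Dict.ofList tiles).items.any
          (fun p => (p.1 != tile_name) && pvMatches s (p.2.map String.toList))) := by
  apply Bool.coe_iff_coe.mp
  have hbody : (fun (acc : List (List Char)) t =>
        if t ≠ tile_name then acc ++ pvSidesA ((PySem.Dict.ofList tiles).getD t []) else acc)
      = fun acc t => acc ++ (if t ≠ tile_name then pvSidesA ((PySem.Dict.ofList tiles).getD t []) else []) := by
    funext acc t; split_ifs <;> simp
  rw [hbody, PySem.List.foldl_append_eq_flatMap]
  simp only [List.contains_iff_mem, List.nil_append, List.mem_flatMap, List.any_eq_true,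
    Bool.and_eq_true, bne_iff_ne]
  constructor
  · rintro ⟨t, ht, hs⟩
    rcases eq_or_ne t tile_name with rfl | hne
    · rw [if_neg (by simp)] at hs
      simp at hs
    · rw [if_pos hne] at hs
      have ht' : t ∈ (PySem.Dict.ofList tiles).items.map Prod.fst := ht
      obtain ⟨p, hp, rfl⟩ := List.mem_map.mp ht' 
      have hget : (PySem.Dict.ofList tiles).getD p.1 [] = p.2 :=
        PySem.Dict.getD_of_mem_items _ (by simpa using hp) (PySem.Dict.nodup_keys_ofList tiles) []
      rw [hget] at hs
      exact ⟨p, hp, hne, (mem_sidesA_iff s p.2).mp hs⟩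
  · rintro ⟨p, hp, hne, hm⟩
    refine ⟨p.1, List.mem_map.mpr ⟨p, hp, rfl⟩, ?_⟩
    have hget : (PySem.Dict.ofList tiles).getD p.1 [] = p.2 :=
      PySem.Dict.getD_of_mem_items _ (by simpa using hp) (PySem.Dict.nodup_keys_ofList tiles) []
    rw [if_pos hne, hget]
    exact (mem_sidesA_iff s p.2).mpr hm

-- ===== VERDICT (by name: the statement is the Claim_ definition above) =====
theorem get_number_of_impossible_side_matches_spec : Claim_equal_get_number_of_impossible_side_matches := by
  intro tile_name tiles _ _
  unfold Spec_get_number_of_impossible_side_matches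
  simp only [get_number_of_impossible_side_matches, get_number_of_impossible_side_matches_alt]
  have hbody : (fun (n : Int) (s : List Char) =>
      if (PySem.Dict.ofList tiles).items.any (fun p => (p.1 != tile_name) && pvMatches s (p.2.map String.toList)) then n else n + 1)
      = fun n s => if (!((PySem.Dict.ofList tiles).items.any (fun p => (p.1 != tile_name) && pvMatches s (p.2.map String.toList)))) = true then n + 1 else n := by
    funext n s
    cases h : (PySem.Dict.ofList tiles).items.any (fun p => (p.1 != tile_name) && pvMatches s (p.2.map String.toList)) <;> simp
  rw [hbody, PySem.List.foldl_count_if, ← pvSidesA_eq, ← List.countP_eq_length_filter, zero_add]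
  congr 1
  exact List.countP_congr (fun s _ =>
    iff_of_eq (congrArg (fun b => (!b) = true) (pvAllOther_iff tile_name tiles s)))
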